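-- pv_equiv track=rewrite | github.com/nabiayub/shop_bot | configs.py | number_to_emoji
-- ===== SOURCE A (Python) =====
-- def number_to_emoji(text):
--     emoji_digits = {
--         '0': '0️⃣', '1': '1️⃣', '2': '2️⃣', '3': '3️⃣', '4': '4️⃣',
--         '5': '5️⃣', '6': '6️⃣', '7': '7️⃣', '8': '8️⃣', '9': '9️⃣'
--     }
--     for digit, emoji in emoji_digits.items():
--         text = text.replace(digit, emoji)
--
--     return text
-- ===== SOURCE B (Python) =====
-- def number_to_emoji(text):
--     # No table at all: a keycap emoji is just the digit followed by U+FE0F U+20E3,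
--     # so one pass appends the combining suffix to each digit character.
--     return ''.join(c + '\ufe0f\u20e3' if '0' <= c <= '9' else c for c in text)
-- ===== Notes on version B (the rewrite author's own statement) =====
-- stated objective: simpler
-- what changed: A rewrites the whole string ten times with str.replace, one pass per digit and a ten-entry table; B drops the table entirely and makes a single pass, appending the keycap combining suffix U+FE0F U+20E3 to any character in '0'..'9'.
import Mathlib
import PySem

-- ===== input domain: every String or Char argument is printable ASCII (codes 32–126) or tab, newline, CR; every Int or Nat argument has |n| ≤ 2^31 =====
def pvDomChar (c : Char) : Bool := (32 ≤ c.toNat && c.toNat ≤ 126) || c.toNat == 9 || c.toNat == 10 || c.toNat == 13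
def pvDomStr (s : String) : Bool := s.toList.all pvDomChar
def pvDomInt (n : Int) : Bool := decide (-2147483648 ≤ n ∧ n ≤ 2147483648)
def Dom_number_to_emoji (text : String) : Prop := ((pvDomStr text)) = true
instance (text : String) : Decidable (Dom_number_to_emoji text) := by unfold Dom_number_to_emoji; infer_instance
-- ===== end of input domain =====

-- B drops A's ten-entry table and its ten full-string replace passes: one pass that appends the keycap suffix U+FE0F U+20E3 to each digit character (simpler; equivalence of RETURN values proved).

-- ===== PORT A =====
-- the dict literal's items, in insertion order
def pvEmojiDigits : PySem.Dict String String := PySem.Dict.mk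
  [("0", "0\uFE0F\u20E3"), ("1", "1\uFE0F\u20E3"), ("2", "2\uFE0F\u20E3"),
   ("3", "3\uFE0F\u20E3"), ("4", "4\uFE0F\u20E3"), ("5", "5\uFE0F\u20E3"),
   ("6", "6\uFE0F\u20E3"), ("7", "7\uFE0F\u20E3"), ("8", "8\uFE0F\u20E3"),
   ("9", "9\uFE0F\u20E3")]

def number_to_emoji (text : String) : String :=
  pvEmojiDigits.items.foldl (fun t p => PySem.Str.replace t p.1 p.2) text

-- ===== PORT B =====
-- Source B's per-character conditional: digit → the char plus the two combining code points, else the char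
def number_to_emoji_alt (text : String) : String :=
  PySem.Str.join "" (text.toList.map (fun c =>
    if '0' ≤ c ∧ c ≤ '9' then String.ofList [c] ++ "\uFE0F\u20E3" else String.ofList [c]))

-- ===== PRECONDITION & SPEC =====
def Spec_number_to_emoji (text : String) (out : String) : Prop := out = number_to_emoji_alt text
instance (text : String) (out : String) : Decidable (Spec_number_to_emoji text out) := by unfold Spec_number_to_emoji; infer_instance

-- ===== CLAIM (what is proved, stated in full; the proofs are below) =====
def Claim_equal_number_to_emoji : Prop := ∀ (text : String), Dom_number_to_emoji text → Spec_number_to_emoji text (number_to_emoji text)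

-- ===== LEMMAS AND PROOFS =====

-- single-character substitution as a flatMap
def pvSubst (d : Char) (r : List Char) (l : List Char) : List Char :=
  l.flatMap (fun c => if c = d then r else [c])

theorem pvReplaceGo (d : Char) (r : List Char) :
    ∀ (l : List Char) (fuel : Nat) (acc : List Char), l.length ≤ fuel →
      PySem.Chars.replace.go [d] r fuel l acc = acc.reverse ++ pvSubst d r l := by
  intro l
  induction l with
  | nil =>
    intro fuel acc _
    cases fuel <;> simp [PySem.Chars.replace.go, pvSubst]
  | cons c t ih =>
    intro fuel acc h
    cases fuel with
    | zero => simp at h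
    | succ n =>
      by_cases hc : c = d
      · have : [d].isPrefixOf (c :: t) = true := by simp [hc, List.isPrefixOf]
        simp only [PySem.Chars.replace.go, this, if_pos, List.length_cons,
          List.length_nil, List.drop_succ_cons, List.drop_zero, Nat.zero_add]
        rw [ih n (r.reverse ++ acc) (by simpa using h)]
        simp [pvSubst, hc]
      · have : [d].isPrefixOf (c :: t) = false := by
          simp [List.isPrefixOf]; exact Ne.symm hc
        simp only [PySem.Chars.replace.go, this, Bool.false_eq_true, if_false]
        rw [ih n (c :: acc) (by simpa using h)]
        simp [pvSubst, hc]

theorem pvReplaceSingle (d : Char) (r l : List Char) :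
    PySem.Chars.replace l [d] r = pvSubst d r l := by
  rw [PySem.Chars.replace]
  simp only [List.isEmpty_cons, Bool.false_eq_true, if_false]
  exact pvReplaceGo d r l l.length [] (le_refl _)

-- ten single-character substitution passes, as a function of the character list (A's pipeline on the list side)
def pvEm (k : Char) : List Char := [k, '\uFE0F', '\u20E3']

def pvPairs : List (Char × List Char) :=
  [('0', pvEm '0'), ('1', pvEm '1'), ('2', pvEm '2'), ('3', pvEm '3'), ('4', pvEm '4'),
   ('5', pvEm '5'), ('6', pvEm '6'), ('7', pvEm '7'), ('8', pvEm '8'), ('9', pvEm '9')]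

def pvAS (l : List Char) : List Char :=
  pvPairs.foldl (fun t p => pvSubst p.1 p.2 t) l

theorem pvStep (s o r : String) (d : Char) (ho : o.toList = [d]) :
    (PySem.Str.replace s o r).toList = pvSubst d r.toList s.toList := by
  rw [PySem.Str.toList_replace, ho, pvReplaceSingle]

theorem pvA_toList (text : String) :
    (number_to_emoji text).toList = pvAS text.toList := by
  simp only [number_to_emoji, pvEmojiDigits, List.foldl]
  rw [pvStep _ _ _ '9' rfl, pvStep _ _ _ '8' rfl, pvStep _ _ _ '7' rfl,
      pvStep _ _ _ '6' rfl, pvStep _ _ _ '5' rfl, pvStep _ _ _ '4' rfl,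
      pvStep _ _ _ '3' rfl, pvStep _ _ _ '2' rfl, pvStep _ _ _ '1' rfl,
      pvStep _ _ _ '0' rfl]
  simp only [show ("0\uFE0F\u20E3" : String).toList = pvEm '0' from rfl,
    show ("1\uFE0F\u20E3" : String).toList = pvEm '1' from rfl,
    show ("2\uFE0F\u20E3" : String).toList = pvEm '2' from rfl,
    show ("3\uFE0F\u20E3" : String).toList = pvEm '3' from rfl,
    show ("4\uFE0F\u20E3" : String).toList = pvEm '4' from rfl,
    show ("5\uFE0F\u20E3" : String).toList = pvEm '5' from rfl,
    show ("6\uFE0F\u20E3" : String).toList = pvEm '6' from rfl,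
    show ("7\uFE0F\u20E3" : String).toList = pvEm '7' from rfl,
    show ("8\uFE0F\u20E3" : String).toList = pvEm '8' from rfl,
    show ("9\uFE0F\u20E3" : String).toList = pvEm '9' from rfl,
    pvAS, pvPairs, List.foldl]

theorem pvAS_append (l1 l2 : List Char) : pvAS (l1 ++ l2) = pvAS l1 ++ pvAS l2 := by
  have key : ∀ (ps : List (Char × List Char)) (a b : List Char),
      ps.foldl (fun t p => pvSubst p.1 p.2 t) (a ++ b)
        = ps.foldl (fun t p => pvSubst p.1 p.2 t) a ++ ps.foldl (fun t p => pvSubst p.1 p.2 t) b := by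
    intro ps
    induction ps with
    | nil => intro a b; rfl
    | cons p t ih =>
      intro a b
      simp only [List.foldl_cons]
      rw [show pvSubst p.1 p.2 (a ++ b) = pvSubst p.1 p.2 a ++ pvSubst p.1 p.2 b by
        simp [pvSubst]]
      exact ih _ _
  exact key pvPairs l1 l2

theorem pvAS_flat (l : List Char) : pvAS l = l.flatMap (fun c => pvAS [c]) := by
  induction l with
  | nil => rfl
  | cons c t ih =>
    have : (c :: t) = [c] ++ t := rfl
    rw [this, pvAS_append, ih]
    simp

-- a digit-range character is one of the ten digit literals
theorem pvDigitCases (c : Char) (h1 : '0' ≤ c) (h2 : c ≤ '9') :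
    c = '0' ∨ c = '1' ∨ c = '2' ∨ c = '3' ∨ c = '4' ∨
    c = '5' ∨ c = '6' ∨ c = '7' ∨ c = '8' ∨ c = '9' := by
  have hv1 : (48 : UInt32) ≤ c.val := h1
  have hv2 : c.val ≤ (57 : UInt32) := h2
  have hn1 : 48 ≤ c.val.toNat := hv1
  have hn2 : c.val.toNat ≤ 57 := hv2
  have : c.val.toNat = 48 ∨ c.val.toNat = 49 ∨ c.val.toNat = 50 ∨ c.val.toNat = 51 ∨
      c.val.toNat = 52 ∨ c.val.toNat = 53 ∨ c.val.toNat = 54 ∨ c.val.toNat = 55 ∨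
      c.val.toNat = 56 ∨ c.val.toNat = 57 := by omega
  have eqc : ∀ n : Nat, c.val.toNat = n → ∀ d : Char, d.val.toNat = n → c = d := by
    intro n hn d hd
    apply Char.ext; apply UInt32.toNat_inj.mp; rw [hn, hd]
  rcases this with h|h|h|h|h|h|h|h|h|h
  · exact Or.inl (eqc _ h '0' rfl)
  · exact Or.inr (Or.inl (eqc _ h '1' rfl))
  · exact Or.inr (Or.inr (Or.inl (eqc _ h '2' rfl)))
  · exact Or.inr (Or.inr (Or.inr (Or.inl (eqc _ h '3' rfl))))
  · exact Or.inr (Or.inr (Or.inr (Or.inr (Or.inl (eqc _ h '4' rfl)))))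
  · exact Or.inr (Or.inr (Or.inr (Or.inr (Or.inr (Or.inl (eqc _ h '5' rfl))))))
  · exact Or.inr (Or.inr (Or.inr (Or.inr (Or.inr (Or.inr (Or.inl (eqc _ h '6' rfl)))))))
  · exact Or.inr (Or.inr (Or.inr (Or.inr (Or.inr (Or.inr (Or.inr (Or.inl (eqc _ h '7' rfl))))))))
  · exact Or.inr (Or.inr (Or.inr (Or.inr (Or.inr (Or.inr (Or.inr (Or.inr (Or.inl (eqc _ h '8' rfl)))))))))
  · exact Or.inr (Or.inr (Or.inr (Or.inr (Or.inr (Or.inr (Or.inr (Or.inr (Or.inr (eqc _ h '9' rfl)))))))))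

-- per character, A's ten passes agree with B's per-character conditional
theorem pvChar (c : Char) :
    pvAS [c] = (if '0' ≤ c ∧ c ≤ '9' then String.ofList [c] ++ "\uFE0F\u20E3"
                else String.ofList [c]).toList := by
  by_cases hd : '0' ≤ c ∧ c ≤ '9'
  · rcases pvDigitCases c hd.1 hd.2 with h|h|h|h|h|h|h|h|h|h <;> subst h <;>
      simp only [if_pos hd] <;> rfl
  · have h0 : c ≠ '0' := by rintro rfl; exact hd (by decide)
    have h1 : c ≠ '1' := by rintro rfl; exact hd (by decide)
    have h2 : c ≠ '2' := by rintro rfl; exact hd (by decide)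
    have h3 : c ≠ '3' := by rintro rfl; exact hd (by decide)
    have h4 : c ≠ '4' := by rintro rfl; exact hd (by decide)
    have h5 : c ≠ '5' := by rintro rfl; exact hd (by decide)
    have h6 : c ≠ '6' := by rintro rfl; exact hd (by decide)
    have h7 : c ≠ '7' := by rintro rfl; exact hd (by decide)
    have h8 : c ≠ '8' := by rintro rfl; exact hd (by decide)
    have h9 : c ≠ '9' := by rintro rfl; exact hd (by decide)
    rw [if_neg hd]
    simp [pvAS, pvPairs, List.foldl, pvSubst, h0, h1, h2, h3, h4, h5, h6, h7, h8, h9]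

theorem pvJoinNil (parts : List (List Char)) : PySem.Chars.join [] parts = parts.flatten := by
  induction parts with
  | nil => rfl
  | cons a t ih => cases t <;> simp_all [PySem.Chars.join, List.intercalate, List.intersperse]

theorem pvB_toList (text : String) :
    (number_to_emoji_alt text).toList
      = text.toList.flatMap (fun c =>
          (if '0' ≤ c ∧ c ≤ '9' then String.ofList [c] ++ "\uFE0F\u20E3"
           else String.ofList [c]).toList) := by
  rw [number_to_emoji_alt, PySem.Str.toList_join]
  have : ("" : String).toList = [] := rfl
  rw [this, pvJoinNil, List.map_map, List.flatMap_def]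
  rfl

-- ===== VERDICT =====
theorem number_to_emoji_spec : Claim_equal_number_to_emoji := by
  intro text _
  unfold Spec_number_to_emoji
  apply String.toList_inj.mp
  rw [pvA_toList, pvB_toList, pvAS_flat]
  simp only [pvChar]
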